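-- pv_equiv track=rewrite | github.com/Nemo7743/PL_Sim_Core | FC_Sim/Data_Gen.py | generate_hex_block
-- ===== SOURCE A (Python) =====
-- def generate_hex_block(start_hex_str, count, items_per_row=4):
--     """
--     生成指定格式的十六進位文本塊
--     :param start_hex_str: 起始數字 (字串, 例如 "0000")
--     :param count: 要生成的數字總數
--     :param items_per_row: 每行顯示幾個數字
--     :return: 格式化後的文本字串
--     """
--     start_int = int(start_hex_str, 16)
--     lines = []
--
--     # 以每行 items_per_row 的步長進行迭代
--     for i in range(0, count, items_per_row):
--         row_items = []
--         for j in range(items_per_row):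
--             if i + j < count:
--                 current_val = start_int + i + j
--                 # :04x 表示格式化為4位數十六進位，不足補0，小寫字母
--                 row_items.append(f"{current_val:04x}")
--         lines.append(" ".join(row_items))
--
--     return "\n".join(lines)
-- ===== SOURCE B (Python) =====
-- def generate_hex_block(start_hex_str, count, items_per_row=4):
--     start_int = int(start_hex_str, 16)
--     parts = []
--     for k in range(count):
--         if k:
--             parts.append("\n" if k % items_per_row == 0 else " ")
--         parts.append(f"{start_int + k:04x}")
--     return "".join(parts)
-- ===== Notes on version B (the rewrite author's own statement) =====
-- stated objective: alternative
-- what changed: Replaces the nested row loops (outer stride loop building per-row lists with an 'i + j < count' bounds guard, then two joins) by a single flat pass over all count indices that emits, before each item, a separator chosen arithmetically: newline when the index is a nonzero multiple of items_per_row, space otherwise.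
-- outside the precondition, e.g. on generate_hex_block('0000', 3, -2): A returns '', B returns '0000 0001\n0002'; on generate_hex_block('0000', -3, -2): A returns '\n', B returns ''
import Mathlib
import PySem

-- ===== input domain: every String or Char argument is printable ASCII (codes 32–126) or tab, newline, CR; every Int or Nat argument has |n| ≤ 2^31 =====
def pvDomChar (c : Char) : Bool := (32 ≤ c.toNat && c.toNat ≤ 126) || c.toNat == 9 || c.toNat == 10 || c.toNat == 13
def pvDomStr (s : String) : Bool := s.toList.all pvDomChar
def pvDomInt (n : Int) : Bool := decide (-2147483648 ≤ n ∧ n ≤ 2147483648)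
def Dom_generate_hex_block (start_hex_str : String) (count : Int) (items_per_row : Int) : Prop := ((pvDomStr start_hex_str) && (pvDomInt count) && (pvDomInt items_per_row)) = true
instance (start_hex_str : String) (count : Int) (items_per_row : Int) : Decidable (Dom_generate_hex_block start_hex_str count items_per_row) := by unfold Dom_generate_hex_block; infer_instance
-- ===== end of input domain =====

-- B replaces A's two nested row loops by a single flat pass over all count indices that
-- emits, before each item, a separator chosen arithmetically (newline at multiples of
-- items_per_row, space otherwise) — no row lists, no per-element bounds guard (objective: alternative).

-- ===== PORT A =====
-- hand-written port of the f-string f"{v:04x}" (PySem has no hex formatter): lowercase hex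
-- digits of |v|, '-' in front for negatives, then zero-pad to width 4 with the sign kept in
-- front (= Python's sign-aware zero padding, exact via PySem.Chars.zfill). Shared by both ports.
def pvHexDigit (n : Nat) : Char :=
  if n < 10 then Char.ofNat (48 + n) else Char.ofNat (87 + n)

def pvHexNat : Nat → List Char
  | 0 => []
  | (n+1) => pvHexNat ((n+1)/16) ++ [pvHexDigit ((n+1)%16)]
decreasing_by exact Nat.div_lt_self (Nat.succ_pos n) (by omega)

def pvFmt04x (v : Int) : String :=
  String.ofList (PySem.Chars.zfill
    (if v < 0 then '-' :: pvHexNat v.natAbs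
     else if v = 0 then ['0'] else pvHexNat v.toNat) 4)

def generate_hex_block (start_hex_str : String) (count : Int) (items_per_row : Int) : String :=
  match PySem.Int.ofStrBase? start_hex_str 16 with
  | none => ""   -- int(start_hex_str, 16) raises ValueError; excluded by Pre_
  | some start_int =>
    let lines := (PySem.List.pyRange 0 count items_per_row).foldl (fun lines i =>
      let row_items := (PySem.List.pyRange 0 items_per_row 1).foldl (fun row_items j =>
        if i + j < count then row_items ++ [pvFmt04x (start_int + i + j)] else row_items) []
      lines ++ [PySem.Str.join " " row_items]) []
    PySem.Str.join "\n" lines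

-- ===== PORT B =====
def generate_hex_block_alt (start_hex_str : String) (count : Int) (items_per_row : Int) : String :=
  match PySem.Int.ofStrBase? start_hex_str 16 with
  | none => ""   -- int(start_hex_str, 16) raises ValueError; excluded by Pre_
  | some start_int =>
    let parts := (PySem.List.pyRange 0 count 1).foldl (fun parts k =>
      (if k ≠ 0 then parts ++ [if PySem.Int.mod k items_per_row = 0 then "\n" else " "] else parts)
        ++ [pvFmt04x (start_int + k)]) []
    PySem.Str.join "" parts

-- ===== PRECONDITION & SPEC =====
-- Pre_ excludes the inputs on which A raises: start_hex_str not a valid base-16 integer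
-- literal (ValueError in int) and items_per_row = 0 (ValueError in range). It also excludes
-- negative items_per_row, on which A still returns: a row width below 1 is outside the
-- function's natural domain, and A's outputs there ('' although count items were requested,
-- or bare newlines) are artefacts of range's negative-step semantics that B's single-pass
-- algorithm does not reproduce.
def Pre_generate_hex_block (start_hex_str : String) (count : Int) (items_per_row : Int) : Prop :=
  (PySem.Int.ofStrBase? start_hex_str 16).isSome ∧ 1 ≤ items_per_row
instance (start_hex_str : String) (count : Int) (items_per_row : Int) : Decidable (Pre_generate_hex_block start_hex_str count items_per_row) := by unfold Pre_generate_hex_block; infer_instance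

def pvWitness_generate_hex_block : String × Int × Int := ("0000", 5, 4)

def Spec_generate_hex_block (start_hex_str : String) (count : Int) (items_per_row : Int) (out : String) : Prop := out = generate_hex_block_alt start_hex_str count items_per_row
instance (start_hex_str : String) (count : Int) (items_per_row : Int) (out : String) : Decidable (Spec_generate_hex_block start_hex_str count items_per_row out) := by unfold Spec_generate_hex_block; infer_instance

-- ===== CLAIM (what is proved, stated in full; the proofs are below) =====
def Claim_equal_generate_hex_block : Prop := ∀ (start_hex_str : String) (count : Int) (items_per_row : Int), Dom_generate_hex_block start_hex_str count items_per_row → Pre_generate_hex_block start_hex_str count items_per_row → Spec_generate_hex_block start_hex_str count items_per_row (generate_hex_block start_hex_str count items_per_row)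

-- ===== LEMMAS AND PROOFS =====

-- the flat target form both programs are reduced to: item k, preceded (for k ≥ 1) by the
-- separator '\n' at multiples of items_per_row and ' ' otherwise
def pvF (st x : Int) : List Char := (pvFmt04x (st + x)).toList

def pvSep (ipr : Int) (n : Nat) : List Char := if PySem.Int.mod (n : Int) ipr = 0 then ['\n'] else [' ']

def pvG (st ipr : Int) : Nat → List Char
  | 0 => []
  | (n+1) => pvG st ipr n ++ (if n = 0 then [] else pvSep ipr n) ++ pvF st (n : Int)

theorem pvG_succ (st ipr : Int) (n : Nat) :
    pvG st ipr (n + 1) = pvG st ipr n ++ (if n = 0 then [] else pvSep ipr n) ++ pvF st (n : Int) := rfl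

-- join with empty separator is concatenation
theorem pv_join_nil_flatten (L : List (List Char)) : PySem.Chars.join [] L = L.flatten := by
  induction L with
  | nil => rw [PySem.Chars.join_nil, List.flatten_nil]
  | cons x L ih =>
    cases L with
    | nil => rw [PySem.Chars.join_singleton]; simp
    | cons y r =>
      rw [PySem.Chars.join_cons_cons, List.flatten_cons, ih]
      simp

-- peeling the last element off a join
theorem pv_join_append_singleton (sep x : List Char) (L : List (List Char)) :
    PySem.Chars.join sep (L ++ [x])
      = if L = [] then x else PySem.Chars.join sep L ++ sep ++ x := by
  induction L with
  | nil => simp [PySem.Chars.join_singleton]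
  | cons a L ih =>
    cases L with
    | nil => simp [PySem.Chars.join_cons_cons, PySem.Chars.join_singleton]
    | cons b L' =>
      have h1 : ((a :: b :: L') ++ [x]) = a :: ((b :: L') ++ [x]) := by simp
      rw [h1, show ((b :: L') ++ [x]) = b :: (L' ++ [x]) by simp]
      rw [PySem.Chars.join_cons_cons]
      have ih' : PySem.Chars.join sep (b :: (L' ++ [x]))
          = PySem.Chars.join sep (b :: L') ++ sep ++ x := by
        have := ih
        rw [if_neg (by simp)] at this
        simpa using this
      rw [ih']
      rw [if_neg (by simp), PySem.Chars.join_cons_cons]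
      simp [List.append_assoc]

-- keeping only k < m of range n is range (min n m)
theorem pv_filter_range_lt (n m : Nat) :
    (List.range n).filter (fun k => decide (k < m)) = List.range (min n m) := by
  induction n with
  | zero => simp
  | succ n ih =>
    rw [List.range_succ, List.filter_append]
    by_cases h : n < m
    · have h2 : min n m = n := by omega
      have h1 : min (n+1) m = n + 1 := by omega
      simp [h2, List.range_succ, ih, h]
    · have h1 : min (n+1) m = min n m := by omega
      simp [h1, ih, h]

-- peeling one full (or final partial) row off the flat form pvG
theorem pv_chunk (st ipr : Int) (p : Nat) (hip : (p : Int) = ipr) (hp : 0 < p) (i t : Nat)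
    (hdvd : p ∣ i) (ht1 : 1 ≤ t) (htp : t ≤ p) :
    pvG st ipr (i + t) = pvG st ipr i ++ (if i = 0 then [] else ['\n'])
      ++ PySem.Chars.join [' '] ((List.range t).map (fun j => pvF st ((i + j : Nat) : Int))) := by
  induction t with
  | zero => omega
  | succ t ih =>
    have hdvdZ : ipr ∣ (i : Int) := by
      rw [← hip]; exact_mod_cast Int.natCast_dvd_natCast.mpr hdvd
    by_cases ht : t = 0
    · subst ht
      rw [pvG_succ]
      have hsep : (if i = 0 then ([] : List Char) else pvSep ipr i)
          = (if i = 0 then [] else ['\n']) := by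
        by_cases hi : i = 0
        · rw [if_pos hi, if_pos hi]
        · rw [if_neg hi, if_neg hi]; unfold pvSep
          rw [if_pos ((PySem.Int.mod_eq_zero_iff_dvd _ _).mpr hdvdZ)]
      rw [hsep]
      simp [PySem.Chars.join_singleton]
    · have ht1' : 1 ≤ t := by omega
      have htp' : t ≤ p := by omega
      have hnd : ¬ ipr ∣ ((i + t : Nat) : Int) := by
        intro h
        have hdt : ipr ∣ (t : Int) := by
          have h2 : ((i + t : Nat) : Int) = (i : Int) + (t : Int) := by push_cast; ring
          rw [h2] at h
          have := dvd_sub h hdvdZ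
          simpa using this
        have hle := Int.le_of_dvd (by exact_mod_cast ht1') hdt
        have : (t : Int) ≤ (p : Int) - 1 := by
          have : t + 1 ≤ p := htp
          exact_mod_cast (by omega : (t:Int) ≤ (p:Int) - 1)
        omega
      have hne : ¬ (i + t = 0) := by omega
      have step : pvG st ipr (i + (t + 1))
          = pvG st ipr (i + t) ++ [' '] ++ pvF st ((i + t : Nat) : Int) := by
        rw [show i + (t + 1) = (i + t) + 1 from rfl, pvG_succ, if_neg hne]
        unfold pvSep
        rw [if_neg (fun h => hnd ((PySem.Int.mod_eq_zero_iff_dvd _ _).mp h))]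
      rw [step, ih ht1' htp']
      rw [List.range_succ, List.map_append, List.map_singleton, pv_join_append_singleton]
      have hmapne : ((List.range t).map (fun j => pvF st ((i + j : Nat) : Int))) ≠ [] := by
        simp only [ne_eq, List.map_eq_nil_iff, List.range_eq_nil]
        omega
      rw [if_neg hmapne]
      simp [List.append_assoc]

-- B's fold, isolated
def pvBfold (st ipr : Int) (n : Nat) : List String :=
  ((List.range n).map (fun k : Nat => (k : Int))).foldl (fun parts k =>
    (if k ≠ 0 then parts ++ [if PySem.Int.mod k ipr = 0 then "\n" else " "] else parts)
      ++ [pvFmt04x (st + k)]) []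

theorem pv_Bfold_succ (st ipr : Int) (n : Nat) :
    pvBfold st ipr (n + 1)
      = (if (n : Int) ≠ 0 then pvBfold st ipr n ++ [if PySem.Int.mod (n : Int) ipr = 0 then "\n" else " "] else pvBfold st ipr n)
        ++ [pvFmt04x (st + (n : Int))] := by
  simp [pvBfold, List.range_succ]

theorem pv_B_flatten (st ipr : Int) (n : Nat) :
    ((pvBfold st ipr n).map String.toList).flatten = pvG st ipr n := by
  induction n with
  | zero => simp [pvBfold, pvG]
  | succ n ih =>
    rw [pv_Bfold_succ, pvG_succ]
    by_cases hn : n = 0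
    · subst hn
      rw [if_neg (by simp)]
      simp [pvF, pvBfold, show pvG st ipr 0 = [] from rfl]
    · have hne : ((n : Int) ≠ 0) := by exact_mod_cast hn
      rw [if_pos hne, if_neg hn]
      rw [List.map_append, List.flatten_append, List.map_append, List.flatten_append, ih]
      have hsep : (List.map String.toList
            [if PySem.Int.mod (n : Int) ipr = 0 then "\n" else " "]).flatten = pvSep ipr n := by
        unfold pvSep
        by_cases hd : PySem.Int.mod (n : Int) ipr = 0
        · rw [if_pos hd, if_pos hd]; rfl
        · rw [if_neg hd, if_neg hd]; rfl
      rw [hsep]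
      simp [pvF, List.append_assoc]

theorem pv_B_toList (s : String) (c ipr st : Int)
    (hs : PySem.Int.ofStrBase? s 16 = some st) :
    (generate_hex_block_alt s c ipr).toList = pvG st ipr c.toNat := by
  unfold generate_hex_block_alt
  rw [hs]
  have hr : PySem.List.pyRange 0 c 1 = (List.range c.toNat).map (fun k : Nat => (k : Int)) := by
    rw [PySem.List.pyRange_one]; simp
  rw [hr]
  rw [PySem.Str.toList_join, show ("" : String).toList = [] from rfl, pv_join_nil_flatten]
  exact pv_B_flatten st ipr c.toNat

-- A's result, row-joined closed form equals pvG: induction on the number of rows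
theorem pv_join_rows (st ipr : Int) (p : Nat) (hip : (p : Int) = ipr) (hp : 0 < p) (q : Nat) :
    ∀ m : Nat, 0 < q → q * p < m + p → m ≤ q * p →
    PySem.Chars.join ['\n'] ((List.range q).map (fun r =>
      PySem.Chars.join [' '] ((List.range (min p (m - p * r))).map
        (fun j => pvF st ((p * r + j : Nat) : Int))))) = pvG st ipr m := by
  induction q with
  | zero => intro m h0; omega
  | succ q ih =>
    intro m _ hlo hhi
    by_cases hq : q = 0
    · subst hq
      simp only [Nat.zero_add, List.range_one, List.map_cons, List.map_nil,
        PySem.Chars.join_singleton]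
      have hm : 0 < m := by omega
      have hmp : m ≤ p := by omega
      have hmin : min p (m - p * 0) = m := by omega
      rw [hmin]
      have hc := pv_chunk st ipr p hip hp 0 m ⟨0, by ring⟩ (by omega) hmp
      rw [show (0 : Nat) + m = m by omega] at hc
      rw [hc]
      have h0 : pvG st ipr 0 = [] := rfl
      rw [h0, if_pos rfl]
      simp
    · -- q ≥ 1: peel the last row
      have hq1 : 1 ≤ q := by omega
      -- linear facts about the products, as atoms
      have hmul1 : q * p + p = (q + 1) * p := by ring
      have hqm : q * p < m := by
        have := hlo
        rw [show (q + 1) * p = q * p + p by ring] at this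
        omega
      rw [List.range_succ, List.map_append, List.map_singleton, pv_join_append_singleton]
      have hmapne : ((List.range q).map (fun r =>
          PySem.Chars.join [' '] ((List.range (min p (m - p * r))).map
            (fun j => pvF st ((p * r + j : Nat) : Int))))) ≠ [] := by
        simp [List.range_eq_nil]; omega
      rw [if_neg hmapne]
      -- the first q rows are full rows, the same for m and for q*p
      have hrows : ((List.range q).map (fun r =>
          PySem.Chars.join [' '] ((List.range (min p (m - p * r))).map
            (fun j => pvF st ((p * r + j : Nat) : Int)))))
          = ((List.range q).map (fun r =>
          PySem.Chars.join [' '] ((List.range (min p (q * p - p * r))).map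
            (fun j => pvF st ((p * r + j : Nat) : Int))))) := by
        apply List.map_congr_left
        intro r hr
        have hrq : r < q := List.mem_range.mp hr
        have hsum : p * r + p ≤ p * q := by
          have := Nat.mul_le_mul_left p (show r + 1 ≤ q by omega)
          rw [Nat.mul_succ] at this
          exact this
        have hcomm : p * q = q * p := by ring
        have h1 : min p (m - p * r) = p := by
          generalize hA : p * r = A at hsum
          generalize hB : p * q = B at hsum hcomm
          generalize hC : q * p = C at hcomm hqm hhi
          omega
        have h2 : min p (q * p - p * r) = p := by
          generalize hA : p * r = A at hsum
          generalize hB : p * q = B at hsum hcomm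
          generalize hC : q * p = C at hcomm
          omega
        rw [h1, h2]
      have hihbounds1 : q * p < q * p + p := by omega
      rw [hrows, ih (q * p) (by omega) hihbounds1 (le_refl _)]
      -- last row via pv_chunk at i = q*p, t = m - q*p
      have hdvd : p ∣ q * p := ⟨q, by ring⟩
      have ht1 : 1 ≤ m - q * p := by
        generalize hC : q * p = C at hqm
        omega
      have hmqp : m - q * p ≤ p := by
        have h2 : m ≤ q * p + p := by
          rw [hmul1]; exact hhi
        generalize hC : q * p = C at h2
        omega
      have hc := pv_chunk st ipr p hip hp (q * p) (m - q * p) hdvd ht1 hmqp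
      rw [show q * p + (m - q * p) = m by
        generalize hC : q * p = C at hqm
        omega] at hc
      rw [hc]
      have hqp0 : ¬ (q * p = 0) := by positivity
      rw [if_neg hqp0]
      have hminlast : min p (m - p * q) = m - q * p := by
        have hcomm : p * q = q * p := by ring
        have h2 : m ≤ q * p + p := by rw [hmul1]; exact hhi
        generalize hC : q * p = C at hcomm h2 hqm
        rw [hcomm]
        omega
      rw [hminlast, show p * q = q * p by ring]

-- A's loops, rewritten to the row-map closed form, then to pvG (positive step)
theorem pv_A_toList_pos (s : String) (c ipr st : Int) (hp : 0 < ipr)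
    (hs : PySem.Int.ofStrBase? s 16 = some st) :
    (generate_hex_block s c ipr).toList = pvG st ipr c.toNat := by
  unfold generate_hex_block
  rw [hs]
  simp only [PySem.List.foldl_append_singleton_eq_map, List.nil_append]
  rw [PySem.Str.toList_join, List.map_map]
  by_cases hc : c ≤ 0
  · rw [PySem.List.pyRange_of_pos 0 c hp]
    rw [if_neg (by omega)]
    simp only [List.range_zero, List.map_nil, PySem.Chars.join_nil]
    rw [show c.toNat = 0 by omega]
    rfl
  · push_neg at hc
    obtain ⟨p, rfl⟩ : ∃ p : Nat, ((p : Nat) : Int) = ipr :=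
      ⟨ipr.toNat, Int.toNat_of_nonneg (by omega)⟩
    obtain ⟨m, rfl⟩ : ∃ m : Nat, ((m : Nat) : Int) = c :=
      ⟨c.toNat, Int.toNat_of_nonneg (by omega)⟩
    have hp' : 0 < p := by exact_mod_cast hp
    have hm' : 0 < m := by exact_mod_cast hc
    rw [PySem.List.pyRange_of_pos 0 (m : Int) hp, if_pos (by omega)]
    -- the number of rows as a natural-number ceiling division
    have hRval : ((((m : Nat) : Int) - 0 + ((p : Nat) : Int) - 1) / ((p : Nat) : Int)).toNat
        = (m + p - 1) / p := by
      have h1 : ((m : Nat) : Int) - 0 + ((p : Nat) : Int) - 1 = (((m + p - 1 : Nat) : Nat) : Int) := by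
        push_cast
        omega
      rw [h1, show ((m + p - 1 : Nat) : Int) / ((p : Nat) : Int) = (((m + p - 1) / p : Nat) : Int)
        from (Int.natCast_ediv _ _).symm]
      exact Int.toNat_natCast _
    rw [hRval]
    have hdm := Nat.div_add_mod (m + p - 1) p
    have hmod := Nat.mod_lt (m + p - 1) hp'
    have hR1 : 0 < (m + p - 1) / p := by
      rcases Nat.lt_or_ge ((m + p - 1) / p) 1 with h | h
      · exfalso
        generalize hD : (m + p - 1) / p = D at hdm h
        generalize hE : (m + p - 1) % p = E at hdm hmod
        have hD0 : D = 0 := by omega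
        subst hD0
        simp at hdm
        omega
      · omega
    have hRlo : ((m + p - 1) / p) * p < m + p := by
      generalize hD : (m + p - 1) / p = D at hdm ⊢
      generalize hE : (m + p - 1) % p = E at hdm hmod
      generalize hP : p * D = P at hdm
      have : D * p = P := by rw [← hP]; ring
      omega
    have hRhi : m ≤ ((m + p - 1) / p) * p := by
      generalize hD : (m + p - 1) / p = D at hdm ⊢
      generalize hE : (m + p - 1) % p = E at hdm hmod
      generalize hP : p * D = P at hdm
      have : D * p = P := by rw [← hP]; ring
      omega
    rw [List.map_map, show ("\n" : String).toList = ['\n'] from rfl,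
      show Int.toNat ((m : Nat) : Int) = m by simp]
    refine Eq.trans (congrArg (PySem.Chars.join ['\n']) (List.map_congr_left (fun r hr => ?_)))
      (pv_join_rows st ((p : Nat) : Int) p rfl hp' ((m + p - 1) / p) m hR1 hRlo hRhi)
    have hrR : r < (m + p - 1) / p := List.mem_range.mp hr
    simp only [Function.comp_apply, Function.comp, zero_add]
    have hrowA := PySem.List.foldl_append_if
      (fun j => decide (((p : Nat) : Int) * (r : Int) + j < ((m : Nat) : Int)))
      (fun j => pvFmt04x (st + ((p : Nat) : Int) * (r : Int) + j))
      (PySem.List.pyRange 0 ((p : Nat) : Int) 1) []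
    simp only [decide_eq_true_eq, List.nil_append] at hrowA
    rw [hrowA, PySem.Str.toList_join, show (" " : String).toList = [' '] from rfl]
    congr 1
    rw [PySem.List.pyRange_one]
    simp only [sub_zero, List.filter_map, List.map_map, show Int.toNat ((p : Nat) : Int) = p by simp]
    have hfilter : (List.range p).filter
        ((fun j => decide (((p : Nat) : Int) * (r : Int) + j < ((m : Nat) : Int))) ∘ (fun k : Nat => 0 + (k : Int)))
        = (List.range p).filter (fun k => decide (k < m - p * r)) := by
      apply List.filter_congr
      intro k _
      simp only [Function.comp, zero_add, decide_eq_decide]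
      constructor
      · intro h
        have h2 : p * r + k < m := by exact_mod_cast h
        omega
      · intro h
        have h2 : p * r + k < m := by omega
        exact_mod_cast h2
    rw [hfilter, pv_filter_range_lt]
    apply List.map_congr_left
    intro j hj
    simp only [Function.comp, pvF]
    congr 2
    push_cast
    ring

-- ===== VERDICT (by name: the statements are the Claim_ definitions above) =====
theorem generate_hex_block_spec : Claim_equal_generate_hex_block := by
  intro s c ipr _ hpre
  unfold Spec_generate_hex_block
  obtain ⟨hsome, hipr⟩ := hpre
  obtain ⟨st, hs⟩ := Option.isSome_iff_exists.mp hsome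
  apply String.toList_inj.mp
  rw [pv_A_toList_pos s c ipr st (by omega) hs, pv_B_toList s c ipr st hs]
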